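-- pv_equiv track=rewrite | github.com/SOC10111/Thesis-Admission-Controller-Detection | analysis/admission_controller_ml.py | _categorize_risk_features
-- ===== SOURCE A (Python) =====
-- def _categorize_risk_features(active_features: dict) -> dict:
--     """Categorize active features into risk categories for easier interpretation"""
--     categories = {
--         'Process Risks': [],
--         'File Access Risks': [],
--         'Network Risks': [],
--         'Container Risks': [],
--         'Security Violations': [],
--         'Kubernetes Risks': []
--     }
--
--     for feature in active_features:
--         if any(x in feature.lower() for x in ['process', 'command', 'privileged', 'capability']):
--             categories['Process Risks'].append(feature)
--         elif 'file' in feature.lower() or 'config' in feature.lower():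
--             categories['File Access Risks'].append(feature)
--         elif 'network' in feature.lower() or 'connection' in feature.lower():
--             categories['Network Risks'].append(feature)
--         elif 'container' in feature.lower() or 'mount' in feature.lower():
--             categories['Container Risks'].append(feature)
--         elif 'violation' in feature.lower() or 'escalation' in feature.lower():
--             categories['Security Violations'].append(feature)
--         elif any(x in feature.lower() for x in ['namespace', 'rbac', 'api', 'kubernetes']):
--             categories['Kubernetes Risks'].append(feature)
--
--     return categories
-- ===== SOURCE B (Python) =====
-- _TABLE = [
--     ('Process Risks', ('process', 'command', 'privileged', 'capability')),
--     ('File Access Risks', ('file', 'config')),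
--     ('Network Risks', ('network', 'connection')),
--     ('Container Risks', ('container', 'mount')),
--     ('Security Violations', ('violation', 'escalation')),
--     ('Kubernetes Risks', ('namespace', 'rbac', 'api', 'kubernetes')),
-- ]
--
--
-- def _bucket(feature):
--     """Index of the first category whose keywords match, or None."""
--     low = feature.lower()
--     for i, (_, kws) in enumerate(_TABLE):
--         if any(k in low for k in kws):
--             return i
--     return None
--
--
-- def _categorize_risk_features(active_features: dict) -> dict:
--     return {name: [f for f in active_features if _bucket(f) == i]
--             for i, (name, _) in enumerate(_TABLE)}
-- ===== Notes on version B (the rewrite author's own statement) =====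
-- stated objective: idiomatic
-- what changed: Replaces the six-branch elif ladder mutating a pre-built dict with a data-driven (name, keywords) table plus a first-match bucket-index function, building the result as one dict comprehension that filters the features per category.
import Mathlib
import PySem

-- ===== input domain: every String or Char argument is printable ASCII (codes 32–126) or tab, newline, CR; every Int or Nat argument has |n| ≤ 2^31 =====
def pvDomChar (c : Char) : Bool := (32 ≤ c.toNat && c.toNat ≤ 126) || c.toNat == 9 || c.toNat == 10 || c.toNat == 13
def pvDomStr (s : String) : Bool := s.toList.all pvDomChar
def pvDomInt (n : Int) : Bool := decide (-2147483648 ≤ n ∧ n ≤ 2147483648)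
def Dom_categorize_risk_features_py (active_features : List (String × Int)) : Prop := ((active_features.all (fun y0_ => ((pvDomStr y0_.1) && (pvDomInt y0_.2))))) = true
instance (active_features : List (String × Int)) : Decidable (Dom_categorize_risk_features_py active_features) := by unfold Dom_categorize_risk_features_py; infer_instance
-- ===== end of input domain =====

-- B replaces the elif ladder with a (name, keywords) table and a per-category filter; same output (idiomatic, not faster).

-- ===== PORT A =====
-- literal transliteration of A's elif ladder mutating a pre-initialized dict
def categorize_risk_features_py (active_features : List (String × Int)) : List (String × List String) :=
  let categories : PySem.Dict String (List String) :=
    ((((((PySem.Dict.empty.insert "Process Risks" []).insert "File Access Risks" []).insert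
        "Network Risks" []).insert "Container Risks" []).insert
        "Security Violations" []).insert "Kubernetes Risks" [])
  let categories := active_features.foldl (fun categories p =>
    let feature := p.1
    if (["process", "command", "privileged", "capability"].any
          (fun x => PySem.Str.isIn x (PySem.Str.lower feature))) then
      categories.modify "Process Risks" [] (fun l => l ++ [feature])
    else if (PySem.Str.isIn "file" (PySem.Str.lower feature) ||
             PySem.Str.isIn "config" (PySem.Str.lower feature)) then
      categories.modify "File Access Risks" [] (fun l => l ++ [feature])
    else if (PySem.Str.isIn "network" (PySem.Str.lower feature) ||
             PySem.Str.isIn "connection" (PySem.Str.lower feature)) then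
      categories.modify "Network Risks" [] (fun l => l ++ [feature])
    else if (PySem.Str.isIn "container" (PySem.Str.lower feature) ||
             PySem.Str.isIn "mount" (PySem.Str.lower feature)) then
      categories.modify "Container Risks" [] (fun l => l ++ [feature])
    else if (PySem.Str.isIn "violation" (PySem.Str.lower feature) ||
             PySem.Str.isIn "escalation" (PySem.Str.lower feature)) then
      categories.modify "Security Violations" [] (fun l => l ++ [feature])
    else if (["namespace", "rbac", "api", "kubernetes"].any
          (fun x => PySem.Str.isIn x (PySem.Str.lower feature))) then
      categories.modify "Kubernetes Risks" [] (fun l => l ++ [feature])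
    else categories) categories
  categories.items

-- ===== PORT B =====
def pvTable : List (String × List String) :=
  [("Process Risks", ["process", "command", "privileged", "capability"]),
   ("File Access Risks", ["file", "config"]),
   ("Network Risks", ["network", "connection"]),
   ("Container Risks", ["container", "mount"]),
   ("Security Violations", ["violation", "escalation"]),
   ("Kubernetes Risks", ["namespace", "rbac", "api", "kubernetes"])]

-- the for-loop with early return in _bucket
def pvBucketAux (low : String) : List (Int × (String × List String)) → Option Int
  | [] => none
  | (i, (_, kws)) :: rest =>
      if kws.any (fun k => PySem.Str.isIn k low) then some i else pvBucketAux low rest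

def pvBucket (feature : String) : Option Int :=
  pvBucketAux (PySem.Str.lower feature) (PySem.List.enumerate pvTable)

def categorize_risk_features_py_alt (active_features : List (String × Int)) : List (String × List String) :=
  (PySem.List.enumerate pvTable).map (fun q =>
    (q.2.1, ((active_features.map Prod.fst).filter (fun f => pvBucket f == some q.1))))

-- ===== PRECONDITION & SPEC =====
def Spec_categorize_risk_features_py (active_features : List (String × Int)) (out : List (String × List String)) : Prop := out = categorize_risk_features_py_alt active_features
instance (active_features : List (String × Int)) (out : List (String × List String)) : Decidable (Spec_categorize_risk_features_py active_features out) := by unfold Spec_categorize_risk_features_py; infer_instance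

-- ===== CLAIM (what is proved, stated in full; the proofs are below) =====
def Claim_equal_categorize_risk_features_py : Prop := ∀ (active_features : List (String × Int)), Dom_categorize_risk_features_py active_features → Spec_categorize_risk_features_py active_features (categorize_risk_features_py active_features)

-- ===== LEMMAS AND PROOFS =====

-- A's loop body, named for the proof (definitionally the lambda inside the port)
def pvStepA (categories : PySem.Dict String (List String)) (p : String × Int) : PySem.Dict String (List String) :=
  let feature := p.1
  if (["process", "command", "privileged", "capability"].any
        (fun x => PySem.Str.isIn x (PySem.Str.lower feature))) then
    categories.modify "Process Risks" [] (fun l => l ++ [feature])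
  else if (PySem.Str.isIn "file" (PySem.Str.lower feature) ||
           PySem.Str.isIn "config" (PySem.Str.lower feature)) then
    categories.modify "File Access Risks" [] (fun l => l ++ [feature])
  else if (PySem.Str.isIn "network" (PySem.Str.lower feature) ||
           PySem.Str.isIn "connection" (PySem.Str.lower feature)) then
    categories.modify "Network Risks" [] (fun l => l ++ [feature])
  else if (PySem.Str.isIn "container" (PySem.Str.lower feature) ||
           PySem.Str.isIn "mount" (PySem.Str.lower feature)) then
    categories.modify "Container Risks" [] (fun l => l ++ [feature])
  else if (PySem.Str.isIn "violation" (PySem.Str.lower feature) ||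
           PySem.Str.isIn "escalation" (PySem.Str.lower feature)) then
    categories.modify "Security Violations" [] (fun l => l ++ [feature])
  else if (["namespace", "rbac", "api", "kubernetes"].any
        (fun x => PySem.Str.isIn x (PySem.Str.lower feature))) then
    categories.modify "Kubernetes Risks" [] (fun l => l ++ [feature])
  else categories

-- the per-feature selection list of category index i
def pvSel (i : Int) (af : List (String × Int)) : List String :=
  (af.map Prod.fst).filter (fun f => pvBucket f == some i)

lemma pvMain (af : List (String × Int)) (l1 l2 l3 l4 l5 l6 : List String) :
    (af.foldl pvStepA (PySem.Dict.mk [("Process Risks", l1), ("File Access Risks", l2), ("Network Risks", l3), ("Container Risks", l4), ("Security Violations", l5), ("Kubernetes Risks", l6)])).items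
    = [("Process Risks", l1 ++ pvSel 0 af), ("File Access Risks", l2 ++ pvSel 1 af),
       ("Network Risks", l3 ++ pvSel 2 af), ("Container Risks", l4 ++ pvSel 3 af),
       ("Security Violations", l5 ++ pvSel 4 af), ("Kubernetes Risks", l6 ++ pvSel 5 af)] := by
  induction af generalizing l1 l2 l3 l4 l5 l6 with
  | nil => simp [pvSel, PySem.Dict.items]
  | cons p rest ih =>
    by_cases h1 : (["process", "command", "privileged", "capability"].any (fun x => PySem.Str.isIn x (PySem.Str.lower p.1))) = true
    · have h1' := h1
      simp only [List.any_cons, List.any_nil, Bool.or_false] at h1'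
      have hb : pvBucket p.1 = some 0 := by
        simp only [pvBucket, pvBucketAux, pvTable, PySem.List.enumerate_cons, PySem.List.enumerate_nil, List.any_cons, List.any_nil, Bool.or_false]
        rw [if_pos h1']
      simp only [List.foldl_cons]
      rw [show pvStepA (PySem.Dict.mk [("Process Risks", l1), ("File Access Risks", l2), ("Network Risks", l3), ("Container Risks", l4), ("Security Violations", l5), ("Kubernetes Risks", l6)]) p = PySem.Dict.mk [("Process Risks", l1 ++ [p.1]), ("File Access Risks", l2), ("Network Risks", l3), ("Container Risks", l4), ("Security Violations", l5), ("Kubernetes Risks", l6)] from by simp only [pvStepA]; rw [if_pos h1]; rfl]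
      rw [ih]
      simp [pvSel, List.filter_cons, hb, List.append_assoc]
    · by_cases h2 : (PySem.Str.isIn "file" (PySem.Str.lower p.1) || PySem.Str.isIn "config" (PySem.Str.lower p.1)) = true
      · have h1' := h1
        simp only [List.any_cons, List.any_nil, Bool.or_false] at h1'
        have hb : pvBucket p.1 = some 1 := by
          simp only [pvBucket, pvBucketAux, pvTable, PySem.List.enumerate_cons, PySem.List.enumerate_nil, List.any_cons, List.any_nil, Bool.or_false]
          rw [if_neg h1', if_pos h2]
          norm_num
        simp only [List.foldl_cons]
        rw [show pvStepA (PySem.Dict.mk [("Process Risks", l1), ("File Access Risks", l2), ("Network Risks", l3), ("Container Risks", l4), ("Security Violations", l5), ("Kubernetes Risks", l6)]) p = PySem.Dict.mk [("Process Risks", l1), ("File Access Risks", l2 ++ [p.1]), ("Network Risks", l3), ("Container Risks", l4), ("Security Violations", l5), ("Kubernetes Risks", l6)] from by simp only [pvStepA]; rw [if_neg h1, if_pos h2]; rfl]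
        rw [ih]
        simp [pvSel, List.filter_cons, hb, List.append_assoc]
      · by_cases h3 : (PySem.Str.isIn "network" (PySem.Str.lower p.1) || PySem.Str.isIn "connection" (PySem.Str.lower p.1)) = true
        · have h1' := h1
          simp only [List.any_cons, List.any_nil, Bool.or_false] at h1'
          have hb : pvBucket p.1 = some 2 := by
            simp only [pvBucket, pvBucketAux, pvTable, PySem.List.enumerate_cons, PySem.List.enumerate_nil, List.any_cons, List.any_nil, Bool.or_false]
            rw [if_neg h1', if_neg h2, if_pos h3]
            norm_num
          simp only [List.foldl_cons]
          rw [show pvStepA (PySem.Dict.mk [("Process Risks", l1), ("File Access Risks", l2), ("Network Risks", l3), ("Container Risks", l4), ("Security Violations", l5), ("Kubernetes Risks", l6)]) p = PySem.Dict.mk [("Process Risks", l1), ("File Access Risks", l2), ("Network Risks", l3 ++ [p.1]), ("Container Risks", l4), ("Security Violations", l5), ("Kubernetes Risks", l6)] from by simp only [pvStepA]; rw [if_neg h1, if_neg h2, if_pos h3]; rfl]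
          rw [ih]
          simp [pvSel, List.filter_cons, hb, List.append_assoc]
        · by_cases h4 : (PySem.Str.isIn "container" (PySem.Str.lower p.1) || PySem.Str.isIn "mount" (PySem.Str.lower p.1)) = true
          · have h1' := h1
            simp only [List.any_cons, List.any_nil, Bool.or_false] at h1'
            have hb : pvBucket p.1 = some 3 := by
              simp only [pvBucket, pvBucketAux, pvTable, PySem.List.enumerate_cons, PySem.List.enumerate_nil, List.any_cons, List.any_nil, Bool.or_false]
              rw [if_neg h1', if_neg h2, if_neg h3, if_pos h4]
              norm_num
            simp only [List.foldl_cons]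
            rw [show pvStepA (PySem.Dict.mk [("Process Risks", l1), ("File Access Risks", l2), ("Network Risks", l3), ("Container Risks", l4), ("Security Violations", l5), ("Kubernetes Risks", l6)]) p = PySem.Dict.mk [("Process Risks", l1), ("File Access Risks", l2), ("Network Risks", l3), ("Container Risks", l4 ++ [p.1]), ("Security Violations", l5), ("Kubernetes Risks", l6)] from by simp only [pvStepA]; rw [if_neg h1, if_neg h2, if_neg h3, if_pos h4]; rfl]
            rw [ih]
            simp [pvSel, List.filter_cons, hb, List.append_assoc]
          · by_cases h5 : (PySem.Str.isIn "violation" (PySem.Str.lower p.1) || PySem.Str.isIn "escalation" (PySem.Str.lower p.1)) = true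
            · have h1' := h1
              simp only [List.any_cons, List.any_nil, Bool.or_false] at h1'
              have hb : pvBucket p.1 = some 4 := by
                simp only [pvBucket, pvBucketAux, pvTable, PySem.List.enumerate_cons, PySem.List.enumerate_nil, List.any_cons, List.any_nil, Bool.or_false]
                rw [if_neg h1', if_neg h2, if_neg h3, if_neg h4, if_pos h5]
                norm_num
              simp only [List.foldl_cons]
              rw [show pvStepA (PySem.Dict.mk [("Process Risks", l1), ("File Access Risks", l2), ("Network Risks", l3), ("Container Risks", l4), ("Security Violations", l5), ("Kubernetes Risks", l6)]) p = PySem.Dict.mk [("Process Risks", l1), ("File Access Risks", l2), ("Network Risks", l3), ("Container Risks", l4), ("Security Violations", l5 ++ [p.1]), ("Kubernetes Risks", l6)] from by simp only [pvStepA]; rw [if_neg h1, if_neg h2, if_neg h3, if_neg h4, if_pos h5]; rfl]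
              rw [ih]
              simp [pvSel, List.filter_cons, hb, List.append_assoc]
            · by_cases h6 : (["namespace", "rbac", "api", "kubernetes"].any (fun x => PySem.Str.isIn x (PySem.Str.lower p.1))) = true
              · have h1' := h1
                simp only [List.any_cons, List.any_nil, Bool.or_false] at h1'
                have h6' := h6
                simp only [List.any_cons, List.any_nil, Bool.or_false] at h6'
                have hb : pvBucket p.1 = some 5 := by
                  simp only [pvBucket, pvBucketAux, pvTable, PySem.List.enumerate_cons, PySem.List.enumerate_nil, List.any_cons, List.any_nil, Bool.or_false]
                  rw [if_neg h1', if_neg h2, if_neg h3, if_neg h4, if_neg h5, if_pos h6']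
                  norm_num
                simp only [List.foldl_cons]
                rw [show pvStepA (PySem.Dict.mk [("Process Risks", l1), ("File Access Risks", l2), ("Network Risks", l3), ("Container Risks", l4), ("Security Violations", l5), ("Kubernetes Risks", l6)]) p = PySem.Dict.mk [("Process Risks", l1), ("File Access Risks", l2), ("Network Risks", l3), ("Container Risks", l4), ("Security Violations", l5), ("Kubernetes Risks", l6 ++ [p.1])] from by simp only [pvStepA]; rw [if_neg h1, if_neg h2, if_neg h3, if_neg h4, if_neg h5, if_pos h6]; rfl]
                rw [ih]
                simp [pvSel, List.filter_cons, hb, List.append_assoc]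
              · have h1' := h1
                simp only [List.any_cons, List.any_nil, Bool.or_false] at h1'
                have h6' := h6
                simp only [List.any_cons, List.any_nil, Bool.or_false] at h6'
                have hb : pvBucket p.1 = none := by
                  simp only [pvBucket, pvBucketAux, pvTable, PySem.List.enumerate_cons, PySem.List.enumerate_nil, List.any_cons, List.any_nil, Bool.or_false]
                  rw [if_neg h1', if_neg h2, if_neg h3, if_neg h4, if_neg h5, if_neg h6']
                simp only [List.foldl_cons]
                rw [show pvStepA (PySem.Dict.mk [("Process Risks", l1), ("File Access Risks", l2), ("Network Risks", l3), ("Container Risks", l4), ("Security Violations", l5), ("Kubernetes Risks", l6)]) p = PySem.Dict.mk [("Process Risks", l1), ("File Access Risks", l2), ("Network Risks", l3), ("Container Risks", l4), ("Security Violations", l5), ("Kubernetes Risks", l6)] from by simp only [pvStepA]; rw [if_neg h1, if_neg h2, if_neg h3, if_neg h4, if_neg h5, if_neg h6]]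
                rw [ih]
                simp [pvSel, List.filter_cons, hb, List.append_assoc]

-- ===== VERDICT (by name: the statement is the Claim_ definition above) =====
theorem categorize_risk_features_py_spec : Claim_equal_categorize_risk_features_py := by
  intro af _
  unfold Spec_categorize_risk_features_py
  have h : categorize_risk_features_py af
      = (af.foldl pvStepA (PySem.Dict.mk [("Process Risks", ([] : List String)), ("File Access Risks", []), ("Network Risks", []), ("Container Risks", []), ("Security Violations", []), ("Kubernetes Risks", [])])).items := rfl
  rw [h, pvMain af [] [] [] [] [] []]
  simp [categorize_risk_features_py_alt, pvTable, PySem.List.enumerate, pvSel]
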